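-- pv_equiv track=rewrite | github.com/E0HYL/AI4Code-Framework | ai4code/augment/adverattack/s2lab/apg/evasion.py | soot_filter
-- ===== SOURCE A (Python) =====
-- def soot_filter(X_original, X_generated, side_effects):
--     """Remove erroneous features caused by Soot libraries.
--
--     A bug in our version of Soot means that some additional libraries are added to the app
--     even if they're explicitly blacklisted. The exact libraries will depend on your version of
--     Soot and Java classpath.
--
--     Here we filter out any features that were not present in either the original malware or any
--     of the injected organs as these have been added erroneously by Soot.
--
--     Args:
--         X_original: The original malware features.
--         X_generated: The generated adversarial malware object.
--         side_effects: The set of side effect features that were added.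
--
--     Returns:
--         Modified X_generated with erroneous features removed.
--
--     """
--     added_by_soot = {
--         'api_calls::android/media/AudioRecord',
--         'api_calls::android/telephony/TelephonyManager;->getSubscriberId',
--         'api_calls::java/net/DatagramSocket',
--         'api_calls::java/net/MulticastSocket',
--         'api_calls::java/net/NetworkInterface',
--         'api_permissions::android_permission_READ_PHONE_STATE',
--         'api_permissions::android_permission_RECORD_AUDIO',
--         'interesting_calls::getCellLocation',
--         'interesting_calls::getCellSignalStrength',
--         'interesting_calls::getDeviceId',
--         'interesting_calls::getNetworkCountryIso',
--         'interesting_calls::getSimCountryIso',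
--         'interesting_calls::getSubscriberId',
--         'interesting_calls::getWifiState',
--         'interesting_calls::sendSMS',
--         'interesting_calls::setWifiEnabled',
--         'urls::http://apache_org/xml/features/validation/dynamic',
--         'urls::http://apache_org/xml/features/validation/schema',
--         'urls::http://java_sun_com/jaxp/xpath/dom',
--         'urls::http://javax_xml_XMLConstants/feature/secure-processing',
--         'urls::http://javax_xml_transform_dom_DOMResult/feature',
--         'urls::http://javax_xml_transform_dom_DOMSource/feature',
--         'urls::http://javax_xml_transform_sax_SAXResult/feature',
--         'urls::http://javax_xml_transform_sax_SAXSource/feature',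
--         'urls::http://javax_xml_transform_sax_SAXTransformerFactory/feature',
--         'urls::http://javax_xml_transform_sax_SAXTransformerFactory/feature/xmlfilter',
--         'urls::http://javax_xml_transform_stream_StreamResult/feature',
--         'urls::http://javax_xml_transform_stream_StreamSource/feature',
--         'urls::http://relaxng_org/ns/structure/1_0',
--         'urls::http://www_w3_org/2001/XMLSchema',
--         'urls::http://www_w3_org/2001/XMLSchema-instance',
--         'urls::http://www_w3_org/2003/11/xpath-datatypes',
--         'urls::http://www_w3_org/TR/REC-xml',
--         'urls::http://www_w3_org/xmlns/2000/',
--         'urls::http://xml_org/sax/features/namespace-prefixes',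
--         'urls::http://xml_org/sax/features/namespaces',
--         'urls::http://xml_org/sax/features/validation',
--         'urls::http://xml_org/sax/properties/declaration-handler',
--         'urls::http://xml_org/sax/properties/lexical-handler',
--         'urls::http://xmlpull_org/v1/doc/features_html'}
--
--     for k in added_by_soot:
--         if k in X_generated and k not in X_original and k not in side_effects:
--             del X_generated[k]
--
--     return X_generated
-- ===== SOURCE B (Python) =====
-- # One pass over X_generated itself: rebuild the feature dict with a filtering
-- # comprehension, keeping a feature unless it is a Soot artifact that appears in
-- # neither the original malware nor the injected side effects.  (Unlike A, which
-- # loops over the constant set deleting keys in place, B returns a NEW dict and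
-- # does not mutate X_generated.)
-- ADDED_BY_SOOT = frozenset({
--     'api_calls::android/media/AudioRecord',
--     'api_calls::android/telephony/TelephonyManager;->getSubscriberId',
--     'api_calls::java/net/DatagramSocket',
--     'api_calls::java/net/MulticastSocket',
--     'api_calls::java/net/NetworkInterface',
--     'api_permissions::android_permission_READ_PHONE_STATE',
--     'api_permissions::android_permission_RECORD_AUDIO',
--     'interesting_calls::getCellLocation',
--     'interesting_calls::getCellSignalStrength',
--     'interesting_calls::getDeviceId',
--     'interesting_calls::getNetworkCountryIso',
--     'interesting_calls::getSimCountryIso',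
--     'interesting_calls::getSubscriberId',
--     'interesting_calls::getWifiState',
--     'interesting_calls::sendSMS',
--     'interesting_calls::setWifiEnabled',
--     'urls::http://apache_org/xml/features/validation/dynamic',
--     'urls::http://apache_org/xml/features/validation/schema',
--     'urls::http://java_sun_com/jaxp/xpath/dom',
--     'urls::http://javax_xml_XMLConstants/feature/secure-processing',
--     'urls::http://javax_xml_transform_dom_DOMResult/feature',
--     'urls::http://javax_xml_transform_dom_DOMSource/feature',
--     'urls::http://javax_xml_transform_sax_SAXResult/feature',
--     'urls::http://javax_xml_transform_sax_SAXSource/feature',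
--     'urls::http://javax_xml_transform_sax_SAXTransformerFactory/feature',
--     'urls::http://javax_xml_transform_sax_SAXTransformerFactory/feature/xmlfilter',
--     'urls::http://javax_xml_transform_stream_StreamResult/feature',
--     'urls::http://javax_xml_transform_stream_StreamSource/feature',
--     'urls::http://relaxng_org/ns/structure/1_0',
--     'urls::http://www_w3_org/2001/XMLSchema',
--     'urls::http://www_w3_org/2001/XMLSchema-instance',
--     'urls::http://www_w3_org/2003/11/xpath-datatypes',
--     'urls::http://www_w3_org/TR/REC-xml',
--     'urls::http://www_w3_org/xmlns/2000/',
--     'urls::http://xml_org/sax/features/namespace-prefixes',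
--     'urls::http://xml_org/sax/features/namespaces',
--     'urls::http://xml_org/sax/features/validation',
--     'urls::http://xml_org/sax/properties/declaration-handler',
--     'urls::http://xml_org/sax/properties/lexical-handler',
--     'urls::http://xmlpull_org/v1/doc/features_html'})
--
--
-- def soot_filter(X_original, X_generated, side_effects):
--     """Remove erroneous features caused by Soot libraries."""
--     return {k: v for k, v in X_generated.items()
--             if k not in ADDED_BY_SOOT or k in X_original or k in side_effects}
-- ===== Notes on version B (the rewrite author's own statement) =====
-- stated objective: alternative
-- what changed: B inverts the traversal: instead of looping over the 40-element constant set and deleting matching keys from X_generated in place, B makes a single filtering pass over X_generated's own items and returns a freshly built dict (no mutation), keeping each feature unless it is a soot key absent from X_original and side_effects.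
import Mathlib
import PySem

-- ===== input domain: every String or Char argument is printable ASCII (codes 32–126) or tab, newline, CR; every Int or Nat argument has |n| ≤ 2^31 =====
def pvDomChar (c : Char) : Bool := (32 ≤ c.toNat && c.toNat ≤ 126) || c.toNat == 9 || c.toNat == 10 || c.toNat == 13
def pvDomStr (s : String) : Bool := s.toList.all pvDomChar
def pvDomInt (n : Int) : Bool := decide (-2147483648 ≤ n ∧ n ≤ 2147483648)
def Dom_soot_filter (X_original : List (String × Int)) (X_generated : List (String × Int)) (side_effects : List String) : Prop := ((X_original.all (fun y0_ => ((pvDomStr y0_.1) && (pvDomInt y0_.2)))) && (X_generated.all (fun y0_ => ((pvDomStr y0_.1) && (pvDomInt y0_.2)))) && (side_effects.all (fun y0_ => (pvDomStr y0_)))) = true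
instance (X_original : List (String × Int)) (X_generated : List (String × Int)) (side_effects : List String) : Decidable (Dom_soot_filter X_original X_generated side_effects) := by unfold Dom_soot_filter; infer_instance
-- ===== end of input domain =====

-- ===== PORT A =====
-- B makes one filtering pass over X_generated's items and returns a new dict, instead of A's
-- loop over the constant soot set deleting keys in place; A mutates X_generated in Python —
-- the equivalence proved here is about the RETURN value.
-- A iterates over a Python set (hash order); each iteration only deletes its own key, so the
-- result does not depend on that order and the port iterates in the literal's order.
def addedBySoot : List String := [
  "api_calls::android/media/AudioRecord",
  "api_calls::android/telephony/TelephonyManager;->getSubscriberId",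
  "api_calls::java/net/DatagramSocket",
  "api_calls::java/net/MulticastSocket",
  "api_calls::java/net/NetworkInterface",
  "api_permissions::android_permission_READ_PHONE_STATE",
  "api_permissions::android_permission_RECORD_AUDIO",
  "interesting_calls::getCellLocation",
  "interesting_calls::getCellSignalStrength",
  "interesting_calls::getDeviceId",
  "interesting_calls::getNetworkCountryIso",
  "interesting_calls::getSimCountryIso",
  "interesting_calls::getSubscriberId",
  "interesting_calls::getWifiState",
  "interesting_calls::sendSMS",
  "interesting_calls::setWifiEnabled",
  "urls::http://apache_org/xml/features/validation/dynamic",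
  "urls::http://apache_org/xml/features/validation/schema",
  "urls::http://java_sun_com/jaxp/xpath/dom",
  "urls::http://javax_xml_XMLConstants/feature/secure-processing",
  "urls::http://javax_xml_transform_dom_DOMResult/feature",
  "urls::http://javax_xml_transform_dom_DOMSource/feature",
  "urls::http://javax_xml_transform_sax_SAXResult/feature",
  "urls::http://javax_xml_transform_sax_SAXSource/feature",
  "urls::http://javax_xml_transform_sax_SAXTransformerFactory/feature",
  "urls::http://javax_xml_transform_sax_SAXTransformerFactory/feature/xmlfilter",
  "urls::http://javax_xml_transform_stream_StreamResult/feature",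
  "urls::http://javax_xml_transform_stream_StreamSource/feature",
  "urls::http://relaxng_org/ns/structure/1_0",
  "urls::http://www_w3_org/2001/XMLSchema",
  "urls::http://www_w3_org/2001/XMLSchema-instance",
  "urls::http://www_w3_org/2003/11/xpath-datatypes",
  "urls::http://www_w3_org/TR/REC-xml",
  "urls::http://www_w3_org/xmlns/2000/",
  "urls::http://xml_org/sax/features/namespace-prefixes",
  "urls::http://xml_org/sax/features/namespaces",
  "urls::http://xml_org/sax/features/validation",
  "urls::http://xml_org/sax/properties/declaration-handler",
  "urls::http://xml_org/sax/properties/lexical-handler",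
  "urls::http://xmlpull_org/v1/doc/features_html"]

def soot_filter (X_original : List (String × Int)) (X_generated : List (String × Int)) (side_effects : List String) : List (String × Int) :=
  (addedBySoot.foldl
    (fun d k =>
      if d.contains k && !(PySem.Dict.mk X_original).contains k && !side_effects.contains k
      then d.erase k else d)
    (PySem.Dict.mk X_generated)).items

-- ===== PORT B =====
-- Source B's dict comprehension: one pass over X_generated.items() keeping the pairs that pass the
-- test; the source keys are distinct, so the built dict's items are exactly the kept pairs.
def soot_filter_alt (X_original : List (String × Int)) (X_generated : List (String × Int)) (side_effects : List String) : List (String × Int) :=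
  (PySem.Dict.mk X_generated).items.filter (fun p =>
    !(PySem.Set.ofList addedBySoot).contains p.1
      || (PySem.Dict.mk X_original).contains p.1
      || side_effects.contains p.1)

-- ===== PRECONDITION & SPEC =====
def Spec_soot_filter (X_original : List (String × Int)) (X_generated : List (String × Int)) (side_effects : List String) (out : List (String × Int)) : Prop := out = soot_filter_alt X_original X_generated side_effects
instance (X_original : List (String × Int)) (X_generated : List (String × Int)) (side_effects : List String) (out : List (String × Int)) : Decidable (Spec_soot_filter X_original X_generated side_effects out) := by unfold Spec_soot_filter; infer_instance

-- ===== CLAIM (what is proved, stated in full; the proofs are below) =====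
def Claim_equal_soot_filter : Prop := ∀ (X_original : List (String × Int)) (X_generated : List (String × Int)) (side_effects : List String), Dom_soot_filter X_original X_generated side_effects → Spec_soot_filter X_original X_generated side_effects (soot_filter X_original X_generated side_effects)

-- ===== LEMMAS AND PROOFS =====
theorem addedBySoot_nodup : addedBySoot.Nodup := by decide

theorem contains_erase_of_ne (d : PySem.Dict String Int) (k x : String) (h : x ≠ k) :
    (d.erase k).contains x = d.contains x := by
  show (d.items.filter fun p => !(p.1 == k)).any (fun p => p.1 == x) = d.items.any (fun p => p.1 == x)
  rw [List.any_filter]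
  refine List.any_congr rfl (fun p => ?_)
  rcases h1 : p.1 == x with _ | _ <;> simp_all

-- A's loop, which tests membership in the CURRENT dict, equals erasing the keys selected
-- against the INITIAL dict, provided the scanned key list has no duplicates.
theorem foldl_cond_erase (L : List String) (p : String → Bool) (d : PySem.Dict String Int)
    (hL : L.Nodup) :
    L.foldl (fun acc k => if acc.contains k && p k then acc.erase k else acc) d
      = (L.filter (fun k => d.contains k && p k)).foldl (fun acc k => acc.erase k) d := by
  induction L generalizing d with
  | nil => rfl
  | cons k T ih =>
    rcases List.nodup_cons.mp hL with ⟨hk, hT⟩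
    by_cases h : (d.contains k && p k) = true
    · simp only [List.foldl_cons, List.filter_cons, h, if_true]
      rw [ih _ hT]
      congr 1
      refine List.filter_congr (fun x hx => ?_)
      rw [contains_erase_of_ne _ _ _ (by rintro rfl; exact hk hx)]
    · simp only [List.foldl_cons, List.filter_cons, h, if_false, Bool.false_eq_true]
      exact ih _ hT

-- A pure erase-loop keeps exactly the items whose key is not in the erased list.
theorem items_foldl_erase (L : List String) (d : PySem.Dict String Int) :
    (L.foldl (fun acc k => acc.erase k) d).items
      = d.items.filter (fun p => !L.contains p.1) := by
  induction L generalizing d with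
  | nil => simp
  | cons k T ih =>
    simp only [List.foldl_cons, ih]
    show (d.items.filter fun p => !(p.1 == k)).filter _ = _
    rw [List.filter_filter]
    refine List.filter_congr (fun p _ => ?_)
    show (!T.contains p.1 && !(p.1 == k)) = !(k :: T).contains p.1
    simp only [List.contains_cons, Bool.not_or]
    rcases h1 : p.1 == k with _ | _ <;> rcases h2 : k == p.1 with _ | _ <;> simp_all [BEq.comm]

theorem contains_ofList (l : List String) (k : String) :
    PySem.Set.contains (PySem.Set.ofList l) k = List.contains l k := by
  rw [Bool.eq_iff_iff]
  simp [PySem.Set.contains, List.contains_iff_mem, PySem.Set.mem_ofList]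

theorem contains_of_mem_items (d : PySem.Dict String Int) (p : String × Int)
    (h : p ∈ d.items) : d.contains p.1 = true := by
  simp only [PySem.Dict.contains, List.any_eq_true]
  exact ⟨p, h, by simp⟩

theorem contains_filter (l : List String) (f : String → Bool) (x : String) :
    (l.filter f).contains x = (l.contains x && f x) := by
  induction l with
  | nil => simp
  | cons a t ih =>
    rcases h : (a == x) with _ | _
    · have hxa : x ≠ a := fun e => by subst e; simp at h
      by_cases hf : f a = true <;>
        simp [List.filter_cons, List.contains_cons, hf, h, hxa, ih]
    · have hax : a = x := by simpa using h
      subst hax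
      by_cases hf : f a = true <;>
        simp [List.filter_cons, List.contains_cons, hf, h, ih]

-- ===== VERDICT (by name: the statement is the Claim_ definition above) =====
theorem soot_filter_spec : Claim_equal_soot_filter := by
  intro Xo Xg se _
  unfold Spec_soot_filter soot_filter soot_filter_alt
  simp only [Bool.and_assoc]
  rw [foldl_cond_erase addedBySoot
        (fun k => !(PySem.Dict.mk Xo).contains k && !se.contains k)
        (PySem.Dict.mk Xg) addedBySoot_nodup,
      items_foldl_erase]
  refine List.filter_congr (fun p hp => ?_)
  have hc := contains_of_mem_items _ _ hp
  rw [contains_filter, hc, contains_ofList]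
  cases addedBySoot.contains p.1 <;>
    cases (PySem.Dict.mk Xo).contains p.1 <;>
    cases se.contains p.1 <;> rfl
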